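-- pv_equiv track=rewrite | github.com/karamkharrathelou/1-Detection-Algorithm | reconstruction.py | biggest_boxes
-- ===== SOURCE A (Python) =====
-- def calculate_area(box):
--     return (box[1] - box[0]) * (box[3] - box[2])
--
-- def biggest_boxes(boxes,noDP):
--     # Check if there are at least 3 boxes
--     if not boxes:
--         return [], [int(noDP/2), int(noDP/2), 0, 0]
--
--     # Sort boxes based on area in descending order
--     sorted_boxes = sorted(boxes, key=calculate_area, reverse=True)
--     if len(sorted_boxes)<3:
--         biggest_boxes = sorted_boxes[:]
--
--         # Calculate the overall bounding box
--         combined_box = [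
--             min(box[0] for box in biggest_boxes),
--             max(box[1] for box in biggest_boxes),
--             min(box[2] for box in biggest_boxes),
--             max(box[3] for box in biggest_boxes)
--         ]
--     else:
--         biggest_boxes = sorted_boxes[:]
--
--         # Calculate the overall bounding box
--         combined_box = [
--             min(box[0] for box in biggest_boxes),
--             max(box[1] for box in biggest_boxes),
--             min(box[2] for box in biggest_boxes),
--             max(box[3] for box in biggest_boxes)
--         ]
--     return biggest_boxes, combined_box
-- ===== SOURCE B (Python) =====
-- def _merge(u, v):
--     out = []
--     i = 0
--     j = 0
--     lu = len(u)
--     lv = len(v)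
--     while i < lu and j < lv:
--         p = v[j]
--         q = u[i]
--         if p[0] < q[0] or (p[0] == q[0] and p[1] < q[1]):
--             out.append(p)
--             j += 1
--         else:
--             out.append(q)
--             i += 1
--     return out + u[i:] + v[j:]
--
--
-- def _msort(d):
--     if len(d) < 2:
--         return d
--     m = len(d) // 2
--     return _merge(_msort(d[:m]), _msort(d[m:]))
--
--
-- def biggest_boxes(boxes, noDP):
--     if not boxes:
--         h = int(noDP / 2)
--         return [], [h, h, 0, 0]
--     # decorate with (negated area, original index): merge-sorting these tagged
--     # triples ascending is exactly a stable descending sort by area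
--     deco = [((b[0] - b[1]) * (b[3] - b[2]), i, b) for i, b in enumerate(boxes)]
--     srt = [p[2] for p in _msort(deco)]
--     # combined bounding box in one fused pass over the original (unsorted) list
--     b0 = boxes[0]
--     minx, maxy, miny, maxx = b0[0], b0[1], b0[2], b0[3]
--     for b in boxes[1:]:
--         minx = min(minx, b[0])
--         maxy = max(maxy, b[1])
--         miny = min(miny, b[2])
--         maxx = max(maxx, b[3])
--     return srt, [minx, maxy, miny, maxx]
-- ===== Notes on version B (the rewrite author's own statement) =====
-- stated objective: alternative
-- what changed: B replaces the library key-sort with a hand-written top-down merge sort over (negated-area, original-index) decorated triples (the injective tag reproduces the stable descending order), and computes the combined bounding box in one fused pass over the original unsorted list instead of four generator scans of the sorted copy.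
import Mathlib
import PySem

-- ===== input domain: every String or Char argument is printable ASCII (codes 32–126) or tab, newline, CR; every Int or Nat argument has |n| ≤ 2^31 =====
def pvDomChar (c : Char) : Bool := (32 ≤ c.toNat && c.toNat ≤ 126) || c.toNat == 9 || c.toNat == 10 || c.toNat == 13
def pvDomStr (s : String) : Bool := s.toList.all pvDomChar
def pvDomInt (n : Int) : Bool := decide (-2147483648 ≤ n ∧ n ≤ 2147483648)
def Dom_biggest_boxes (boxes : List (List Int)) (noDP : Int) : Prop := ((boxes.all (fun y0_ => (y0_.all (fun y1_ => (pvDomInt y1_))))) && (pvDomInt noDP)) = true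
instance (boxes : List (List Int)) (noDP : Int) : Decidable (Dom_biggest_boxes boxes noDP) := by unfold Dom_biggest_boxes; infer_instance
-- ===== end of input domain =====

-- B replaces the library key-sort by a hand-written merge sort on (negated-area, index)-decorated
-- triples and computes the bounding box in one fused pass over the unsorted list; same value everywhere A returns.

-- ===== PORT A =====
-- calculate_area(box)
def pvArea (b : List Int) : Int :=
  (PySem.List.pyGetD b 1 0 - PySem.List.pyGetD b 0 0) *
  (PySem.List.pyGetD b 3 0 - PySem.List.pyGetD b 2 0)

-- the combined_box computation, textually identical in both branches of A
def pvCombinedA (bbs : List (List Int)) : List Int :=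
  [ (PySem.List.min? (bbs.map (fun b => PySem.List.pyGetD b 0 0)) (fun v => v)).getD 0,
    (PySem.List.max? (bbs.map (fun b => PySem.List.pyGetD b 1 0)) (fun v => v)).getD 0,
    (PySem.List.min? (bbs.map (fun b => PySem.List.pyGetD b 2 0)) (fun v => v)).getD 0,
    (PySem.List.max? (bbs.map (fun b => PySem.List.pyGetD b 3 0)) (fun v => v)).getD 0 ]

def biggest_boxes (boxes : List (List Int)) (noDP : Int) : List (List Int) × List Int :=
  if boxes = [] then
    ([], [PySem.Int.truncdiv noDP 2, PySem.Int.truncdiv noDP 2, 0, 0])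
  else
    let sorted_boxes := PySem.List.sorted boxes pvArea true
    if PySem.List.len sorted_boxes < 3 then
      (sorted_boxes, pvCombinedA sorted_boxes)
    else
      (sorted_boxes, pvCombinedA sorted_boxes)

-- ===== PORT B =====
-- the decoration key (b[0]-b[1])*(b[3]-b[2]) of Source B (the negated area)
def pvNegArea (b : List Int) : Int :=
  (PySem.List.pyGetD b 0 0 - PySem.List.pyGetD b 1 0) *
  (PySem.List.pyGetD b 3 0 - PySem.List.pyGetD b 2 0)

-- the comparison p[0] < q[0] or (p[0] == q[0] and p[1] < q[1]) in _merge
def pvBefore (p q : Int × Int × List Int) : Bool :=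
  p.1 < q.1 || (p.1 == q.1 && p.2.1 < q.2.1)

-- _merge(u, v): the two-pointer while loop plus the leftover tails
def pvMerge : List (Int × Int × List Int) → List (Int × Int × List Int) → List (Int × Int × List Int)
  | [], v => v
  | u, [] => u
  | q :: u', p :: v' =>
      if pvBefore p q then p :: pvMerge (q :: u') v' else q :: pvMerge u' (p :: v')
termination_by u v => u.length + v.length

-- _msort(d)
def pvMsort (d : List (Int × Int × List Int)) : List (Int × Int × List Int) :=
  if d.length < 2 then d
  else pvMerge (pvMsort (d.take (d.length / 2))) (pvMsort (d.drop (d.length / 2)))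
termination_by d.length
decreasing_by
  · simp only [List.length_take]; omega
  · simp only [List.length_drop]; omega

-- the decorating comprehension [( (b[0]-b[1])*(b[3]-b[2]), i, b ) for i, b in enumerate(boxes)]
def pvDeco (xs : List (List Int)) : List (Int × Int × List Int) :=
  (PySem.List.enumerate xs 0).map (fun ib => (pvNegArea ib.2, ib.1, ib.2))

-- one iteration of B's fused bbox loop (minx, maxy, miny, maxx)
def pvStep (s : Int × Int × Int × Int) (b : List Int) : Int × Int × Int × Int :=
  (min s.1 (PySem.List.pyGetD b 0 0), max s.2.1 (PySem.List.pyGetD b 1 0),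
   min s.2.2.1 (PySem.List.pyGetD b 2 0), max s.2.2.2 (PySem.List.pyGetD b 3 0))

def biggest_boxes_alt (boxes : List (List Int)) (noDP : Int) : List (List Int) × List Int :=
  if boxes = [] then
    ([], [PySem.Int.truncdiv noDP 2, PySem.Int.truncdiv noDP 2, 0, 0])
  else
    let srt := (pvMsort (pvDeco boxes)).map (fun p => p.2.2)
    let b0 := PySem.List.pyGetD boxes 0 []
    let r := (boxes.drop 1).foldl pvStep
      (PySem.List.pyGetD b0 0 0, PySem.List.pyGetD b0 1 0,
       PySem.List.pyGetD b0 2 0, PySem.List.pyGetD b0 3 0)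
    (srt, [r.1, r.2.1, r.2.2.1, r.2.2.2])

-- ===== PRECONDITION & SPEC =====
-- Pre_ excludes exactly the inputs on which Python A raises IndexError: a box with fewer than 4 entries.
def Pre_biggest_boxes (boxes : List (List Int)) (noDP : Int) : Prop :=
  ∀ b ∈ boxes, 4 ≤ b.length
instance (boxes : List (List Int)) (noDP : Int) : Decidable (Pre_biggest_boxes boxes noDP) := by
  unfold Pre_biggest_boxes; infer_instance
def pvWitness_biggest_boxes : List (List Int) × Int := ([[0, 2, 0, 2], [1, 3, -1, 4]], 7)

def Spec_biggest_boxes (boxes : List (List Int)) (noDP : Int) (out : List (List Int) × List Int) : Prop := out = biggest_boxes_alt boxes noDP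
instance (boxes : List (List Int)) (noDP : Int) (out : List (List Int) × List Int) : Decidable (Spec_biggest_boxes boxes noDP out) := by unfold Spec_biggest_boxes; infer_instance

-- ===== CLAIM (what is proved, stated in full; the proofs are below) =====
def Claim_equal_biggest_boxes : Prop := ∀ (boxes : List (List Int)) (noDP : Int), Dom_biggest_boxes boxes noDP → Pre_biggest_boxes boxes noDP → Spec_biggest_boxes boxes noDP (biggest_boxes boxes noDP)

-- ===== LEMMAS AND PROOFS =====

-- the strict order pvBefore decides: ascending in (negated area, original index)
def pvLt (p q : Int × Int × List Int) : Prop :=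
  p.1 < q.1 ∨ (p.1 = q.1 ∧ p.2.1 < q.2.1)

theorem pvBefore_eq_true_iff (p q : Int × Int × List Int) : pvBefore p q = true ↔ pvLt p q := by
  simp [pvBefore, pvLt]

theorem pvNegArea_eq (b : List Int) : pvNegArea b = -pvArea b := by
  unfold pvNegArea pvArea; ring

theorem pvMerge_perm (u v : List (Int × Int × List Int)) : (pvMerge u v).Perm (u ++ v) := by
  induction u, v using pvMerge.induct with
  | case1 v => simp [pvMerge]
  | case2 u => simp [pvMerge]
  | case3 q u' p v' hb ih =>
      rw [pvMerge, if_pos hb]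
      exact ((ih.cons p).trans List.perm_middle.symm)
  | case4 q u' p v' hb ih =>
      rw [pvMerge, if_neg hb]
      exact ih.cons q

theorem pvMerge_pairwise (u v : List (Int × Int × List Int))
    (hu : u.Pairwise (fun p q => ¬ pvLt q p)) (hv : v.Pairwise (fun p q => ¬ pvLt q p)) :
    (pvMerge u v).Pairwise (fun p q => ¬ pvLt q p) := by
  induction u, v using pvMerge.induct with
  | case1 v => simpa [pvMerge] using hv
  | case2 u => simpa [pvMerge] using hu
  | case3 q u' p v' hb ih =>
      rw [pvMerge, if_pos hb]
      have hlt : pvLt p q := (pvBefore_eq_true_iff p q).mp hb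
      obtain ⟨hpv, hv'⟩ := List.pairwise_cons.mp hv
      refine List.Pairwise.cons ?_ (ih hu hv')
      intro x hx
      have hx' : x ∈ (q :: u') ++ v' := (pvMerge_perm _ _).subset hx
      rcases List.mem_append.mp hx' with hxu | hxv
      · rcases List.mem_cons.mp hxu with rfl | hxu'
        · unfold pvLt at *; omega
        · have h1 : ¬ pvLt x q := (List.pairwise_cons.mp hu).1 x hxu'
          unfold pvLt at *; omega
      · exact hpv x hxv
  | case4 q u' p v' hb ih =>
      rw [pvMerge, if_neg hb]
      have hnlt : ¬ pvLt p q := fun h => hb ((pvBefore_eq_true_iff p q).mpr h)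
      obtain ⟨hqu, hu'⟩ := List.pairwise_cons.mp hu
      refine List.Pairwise.cons ?_ (ih hu' hv)
      intro x hx
      have hx' : x ∈ u' ++ (p :: v') := (pvMerge_perm _ _).subset hx
      rcases List.mem_append.mp hx' with hxu | hxv
      · exact hqu x hxu
      · rcases List.mem_cons.mp hxv with rfl | hxv'
        · exact hnlt
        · have h1 : ¬ pvLt x p := (List.pairwise_cons.mp hv).1 x hxv'
          unfold pvLt at *; omega

theorem pvMsort_perm (d : List (Int × Int × List Int)) : (pvMsort d).Perm d := by
  induction d using pvMsort.induct with
  | case1 d h => rw [pvMsort, if_pos h]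
  | case2 d h ih1 ih2 =>
      rw [pvMsort, if_neg h]
      exact ((pvMerge_perm _ _).trans ((ih1.append ih2).trans (by rw [List.take_append_drop])))

theorem pvMsort_pairwise (d : List (Int × Int × List Int)) :
    (pvMsort d).Pairwise (fun p q => ¬ pvLt q p) := by
  induction d using pvMsort.induct with
  | case1 d h =>
      rw [pvMsort, if_pos h]
      match d, h with
      | [], _ => exact List.Pairwise.nil
      | [x], _ => exact List.pairwise_singleton _ x
  | case2 d h ih1 ih2 => rw [pvMsort, if_neg h]; exact pvMerge_pairwise _ _ ih1 ih2

-- every element of the decorated list carries its own negated area and an index below the length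
theorem mem_pvDeco_shape (xs : List (List Int)) (p : Int × Int × List Int) (hp : p ∈ pvDeco xs) :
    p.1 = pvNegArea p.2.2 ∧ p.2.1 < (xs.length : Int) := by
  obtain ⟨ib, hib, rfl⟩ := List.mem_map.mp hp
  obtain ⟨k, hk, rfl⟩ := (PySem.List.mem_enumerate_iff _ _ _).mp hib
  simpa using hk

theorem pvDeco_append_singleton (xs : List (List Int)) (x : List Int) :
    pvDeco (xs ++ [x]) = pvDeco xs ++ [(pvNegArea x, (xs.length : Int), x)] := by
  unfold pvDeco
  rw [PySem.List.enumerate_append, List.map_append]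
  simp [PySem.List.enumerate]

theorem sorted_append_singleton (xs : List (List Int)) (x : List Int) :
    PySem.List.sorted (xs ++ [x]) pvArea true =
      PySem.List.insertBy (fun a b => decide (pvArea b < pvArea a)) x
        (PySem.List.sorted xs pvArea true) := by
  rw [PySem.List.sorted_rev_eq_foldl_insertBy, PySem.List.sorted_rev_eq_foldl_insertBy,
    List.foldl_append]
  rfl

theorem insertBy_append_of_forall_false {α : Type} (before : α → α → Bool) (x : α)
    (l m : List α) (h : ∀ y ∈ l, before x y = false) :
    PySem.List.insertBy before x (l ++ m) = l ++ PySem.List.insertBy before x m := by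
  induction l with
  | nil => rfl
  | cons y ys ih =>
      have hy : before x y = false := h y List.mem_cons_self
      have hys := ih (fun z hz => h z (List.mem_cons_of_mem _ hz))
      simp [List.cons_append, PySem.List.insertBy, hy, hys]

-- the stability characterisation: any rearrangement of the decorated list that is sorted for
-- the (negated-area, index) order projects to Python's stable descending sort by area
theorem stable_main (xs : List (List Int)) :
    ∀ d : List (Int × Int × List Int), d.Perm (pvDeco xs) →
      d.Pairwise (fun p q => ¬ pvLt q p) →
      d.map (fun p => p.2.2) = PySem.List.sorted xs pvArea true := by
  induction xs using List.reverseRecOn with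
  | nil =>
      intro d hperm _
      have : d = [] := List.Perm.eq_nil (by simpa [pvDeco, PySem.List.enumerate] using hperm)
      simp [this, PySem.List.sorted]
  | append_singleton xs x ih =>
      intro d hperm hpw
      rw [pvDeco_append_singleton] at hperm
      set e : Int × Int × List Int := (pvNegArea x, (xs.length : Int), x) with he
      have hemem : e ∈ d := hperm.mem_iff.mpr (List.mem_append_right _ (List.mem_singleton_self e))
      obtain ⟨u, v, rfl⟩ := List.append_of_mem hemem
      have huv : (u ++ v).Perm (pvDeco xs) := by
        have h1 : (e :: (u ++ v)).Perm (e :: pvDeco xs) :=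
          (List.perm_middle.symm.trans hperm).trans (List.perm_append_singleton e _)
        exact h1.cons_inv
      have hsub : (u ++ v).Sublist (u ++ e :: v) :=
        List.Sublist.append_left (List.sublist_cons_self e v) u
      have hpw' := hpw.sublist hsub
      have hIH := ih (u ++ v) huv hpw'
      obtain ⟨hu, hev, hcross⟩ := List.pairwise_append.mp hpw
      obtain ⟨hexv, hv⟩ := List.pairwise_cons.mp hev
      rw [sorted_append_singleton, ← hIH, List.map_append, List.map_append]
      have hufalse : ∀ y ∈ u.map (fun p => p.2.2),
          (fun a b => decide (pvArea b < pvArea a)) x y = false := by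
        intro y hy
        obtain ⟨p, hpu, rfl⟩ := List.mem_map.mp hy
        have hps := mem_pvDeco_shape xs p (huv.subset (List.mem_append_left v hpu))
        have hne : ¬ pvLt e p := hcross p hpu e (List.mem_cons_self)
        have h1 := pvNegArea_eq p.2.2
        have h2 := pvNegArea_eq x
        unfold pvLt at hne
        simp only [he] at hne
        simp only [decide_eq_false_iff_not, not_lt]
        omega
      rw [insertBy_append_of_forall_false _ _ _ _ hufalse]
      cases v with
      | nil => simp [PySem.List.insertBy, he]
      | cons q v' =>
          have hqs := mem_pvDeco_shape xs q (huv.subset (List.mem_append_right u List.mem_cons_self))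
          have hne : ¬ pvLt q e := hexv q List.mem_cons_self
          have h1 := pvNegArea_eq q.2.2
          have h2 := pvNegArea_eq x
          have hqlt : pvArea q.2.2 < pvArea x := by
            unfold pvLt at hne; simp only [he] at hne; omega
          have hq' : decide (pvArea q.2.2 < pvArea x) = true := by simp [hqlt]
          simp [PySem.List.insertBy, hq', he]

-- B's fused 4-aggregate fold splits into four independent folds
theorem foldl_pvStep (t : List (List Int)) (a b c d : Int) :
    t.foldl pvStep (a, b, c, d) =
      (t.foldl (fun x bx => min x (PySem.List.pyGetD bx 0 0)) a,
       t.foldl (fun x bx => max x (PySem.List.pyGetD bx 1 0)) b,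
       t.foldl (fun x bx => min x (PySem.List.pyGetD bx 2 0)) c,
       t.foldl (fun x bx => max x (PySem.List.pyGetD bx 3 0)) d) := by
  induction t generalizing a b c d with
  | nil => rfl
  | cons y ys ih => simp [List.foldl_cons, pvStep, ih]

-- a running min / max over one list equals the one over any rearrangement
theorem foldl_min_perm (a b : List Int) (x y : Int) (h : (x :: a).Perm (y :: b)) :
    a.foldl min x = b.foldl min y := by
  have h1 : (x :: a).min? = some (a.foldl min x) := List.min?_cons'
  have h2 : (y :: b).min? = some (b.foldl min y) := List.min?_cons'
  rw [List.min?_eq_some_iff] at h1 h2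
  exact le_antisymm (h1.2 _ (h.mem_iff.2 h2.1)) (h2.2 _ (h.mem_iff.1 h1.1))

theorem foldl_max_perm (a b : List Int) (x y : Int) (h : (x :: a).Perm (y :: b)) :
    a.foldl max x = b.foldl max y := by
  have h1 : (x :: a).max? = some (a.foldl max x) := List.max?_cons'
  have h2 : (y :: b).max? = some (b.foldl max y) := List.max?_cons'
  rw [List.max?_eq_some_iff] at h1 h2
  exact le_antisymm (h2.2 _ (h.mem_iff.1 h1.1)) (h1.2 _ (h.mem_iff.2 h2.1))

-- the two bbox components agree: A's generator min/max over the sorted copy,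
-- B's fused fold over the original list
theorem combined_eq (boxes : List (List Int)) (hb : boxes ≠ []) :
    pvCombinedA (PySem.List.sorted boxes pvArea true) =
      (let b0 := PySem.List.pyGetD boxes 0 []
       let r := (boxes.drop 1).foldl pvStep
         (PySem.List.pyGetD b0 0 0, PySem.List.pyGetD b0 1 0,
          PySem.List.pyGetD b0 2 0, PySem.List.pyGetD b0 3 0)
       [r.1, r.2.1, r.2.2.1, r.2.2.2]) := by
  obtain ⟨x, t, rfl⟩ := List.exists_cons_of_ne_nil hb
  have hsne : PySem.List.sorted (x :: t) pvArea true ≠ [] := by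
    rw [Ne, PySem.List.sorted_eq_nil_iff]; exact hb
  obtain ⟨y, s, hys⟩ := List.exists_cons_of_ne_nil hsne
  have hperm : ((y :: s)).Perm (x :: t) := by
    rw [← hys]; exact PySem.List.sorted_perm (x :: t) pvArea true
  simp only [hys, List.drop_one, List.tail_cons, PySem.List.pyGetD_zero_cons, foldl_pvStep]
  have hcomp : ∀ (i : Int),
      s.foldl (fun a b => min a (PySem.List.pyGetD b i 0)) (PySem.List.pyGetD y i 0) =
      t.foldl (fun a b => min a (PySem.List.pyGetD b i 0)) (PySem.List.pyGetD x i 0) := by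
    intro i
    rw [← List.foldl_map (f := fun b => PySem.List.pyGetD b i 0) (g := min),
        ← List.foldl_map (f := fun b => PySem.List.pyGetD b i 0) (g := min)]
    exact foldl_min_perm _ _ _ _ (by simpa using hperm.map (fun b => PySem.List.pyGetD b i 0))
  have hcompx : ∀ (i : Int),
      s.foldl (fun a b => max a (PySem.List.pyGetD b i 0)) (PySem.List.pyGetD y i 0) =
      t.foldl (fun a b => max a (PySem.List.pyGetD b i 0)) (PySem.List.pyGetD x i 0) := by
    intro i
    rw [← List.foldl_map (f := fun b => PySem.List.pyGetD b i 0) (g := max),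
        ← List.foldl_map (f := fun b => PySem.List.pyGetD b i 0) (g := max)]
    exact foldl_max_perm _ _ _ _ (by simpa using hperm.map (fun b => PySem.List.pyGetD b i 0))
  simp [pvCombinedA, PySem.List.min?_id_cons, PySem.List.max?_id_cons, List.foldl_map,
    hcomp 0, hcomp 2, hcompx 1, hcompx 3]

-- ===== VERDICT (by name: the statement is the Claim_ definition above) =====
theorem biggest_boxes_spec : Claim_equal_biggest_boxes := by
  intro boxes noDP _dom _pre
  unfold Spec_biggest_boxes biggest_boxes biggest_boxes_alt
  by_cases hb : boxes = []
  · simp [hb]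
  · simp only [hb, ite_false]
    have hsrt : (pvMsort (pvDeco boxes)).map (fun p => p.2.2) =
        PySem.List.sorted boxes pvArea true :=
      stable_main boxes _ (pvMsort_perm _) (pvMsort_pairwise _)
    have hbb := combined_eq boxes hb
    split_ifs <;> rw [hsrt, hbb]
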